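-- pv_equiv track=rewrite | github.com/YannickPezeu/Hierarchical_search | src/core/indexing_bu.py | remove_duplicate_headers
-- ===== SOURCE A (Python) =====
-- from collections import Counter
--
-- def remove_duplicate_headers(markdown_text: str) -> str:
--     lines = markdown_text.splitlines()
--     headers = [line.strip() for line in lines if line.strip().startswith("#")]
--     header_counts = Counter(headers)
--     duplicate_headers = {header for header, count in header_counts.items() if count > 1}
--     cleaned_lines = []
--     seen_duplicates = set()
--     for line in lines:
--         stripped_line = line.strip()
--         if stripped_line in duplicate_headers:
--             if stripped_line in seen_duplicates:
--                 continue
--             else: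
--                 seen_duplicates.add(stripped_line)
--         cleaned_lines.append(line)
--     return "\n".join(cleaned_lines)
-- ===== SOURCE B (Python) =====
-- def remove_duplicate_headers(markdown_text: str) -> str:
--     kept = []
--     seen = set()
--     for line in markdown_text.splitlines():
--         stripped = line.strip()
--         if stripped.startswith("#"):
--             if stripped in seen:
--                 continue
--             seen.add(stripped)
--         kept.append(line)
--     return "\n".join(kept)
-- ===== Notes on version B (the rewrite author's own statement) =====
-- stated objective: simpler
-- what changed: Single pass with one seen set of header lines, dropping A's pre-counting pass (Counter + duplicate-header set + seen-duplicates set).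
import Mathlib
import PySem

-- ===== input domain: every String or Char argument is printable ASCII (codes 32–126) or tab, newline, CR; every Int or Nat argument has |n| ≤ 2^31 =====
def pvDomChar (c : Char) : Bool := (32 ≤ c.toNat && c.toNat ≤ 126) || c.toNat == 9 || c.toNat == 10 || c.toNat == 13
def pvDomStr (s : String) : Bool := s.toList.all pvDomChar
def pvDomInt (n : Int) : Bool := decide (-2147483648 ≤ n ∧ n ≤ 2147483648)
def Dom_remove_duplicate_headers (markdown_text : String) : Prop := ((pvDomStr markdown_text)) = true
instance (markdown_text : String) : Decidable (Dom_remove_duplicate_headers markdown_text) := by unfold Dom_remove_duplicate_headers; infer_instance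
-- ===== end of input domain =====

-- B is a simpler single-pass rewrite: one `seen` set of stripped header lines replaces A's
-- Counter + duplicate-header set + seen-duplicates set; return value proved equal on Dom.

-- ===== PORT A =====
-- headers = [line.strip() for line in lines if line.strip().startswith("#")]
def pvHeaders (lines : List String) : List String :=
  (lines.filter (fun line => PySem.Str.startswith (PySem.Str.strip line) "#")).map PySem.Str.strip

-- one iteration of A's for-loop (state = (cleaned_lines, seen_duplicates))
def pvStepA (duplicate_headers : PySem.Set String)
    (st : List String × PySem.Set String) (line : String) :
    List String × PySem.Set String :=
  let stripped_line := PySem.Str.strip line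
  if PySem.Set.contains duplicate_headers stripped_line then
    if PySem.Set.contains st.2 stripped_line then st
    else (st.1 ++ [line], PySem.Set.add st.2 stripped_line)
  else (st.1 ++ [line], st.2)

def remove_duplicate_headers (markdown_text : String) : String :=
  let lines := PySem.Str.splitlines markdown_text
  let headers := pvHeaders lines
  let header_counts := PySem.Dict.counter headers
  let duplicate_headers : PySem.Set String :=
    PySem.Set.ofList ((header_counts.items.filter (fun p => 1 < p.2)).map (·.1))
  let res := lines.foldl (pvStepA duplicate_headers) ([], PySem.Set.empty)
  PySem.Str.join "\n" res.1

-- ===== PORT B =====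
-- one iteration of B's for-loop (state = (kept, seen))
def pvStepB (st : List String × PySem.Set String) (line : String) :
    List String × PySem.Set String :=
  let stripped := PySem.Str.strip line
  if PySem.Str.startswith stripped "#" then
    if PySem.Set.contains st.2 stripped then st
    else (st.1 ++ [line], PySem.Set.add st.2 stripped)
  else (st.1 ++ [line], st.2)

def remove_duplicate_headers_alt (markdown_text : String) : String :=
  let res := (PySem.Str.splitlines markdown_text).foldl pvStepB ([], PySem.Set.empty)
  PySem.Str.join "\n" res.1

-- ===== PRECONDITION & SPEC =====
def Spec_remove_duplicate_headers (markdown_text : String) (out : String) : Prop := out = remove_duplicate_headers_alt markdown_text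
instance (markdown_text : String) (out : String) : Decidable (Spec_remove_duplicate_headers markdown_text out) := by unfold Spec_remove_duplicate_headers; infer_instance

-- ===== CLAIM (what is proved, stated in full; the proofs are below) =====
def Claim_equal_remove_duplicate_headers : Prop := ∀ (markdown_text : String), Dom_remove_duplicate_headers markdown_text → Spec_remove_duplicate_headers markdown_text (remove_duplicate_headers markdown_text)

-- ===== LEMMAS AND PROOFS =====

theorem pvDup_mem (headers : List String) (s : String) :
    s ∈ PySem.Set.ofList
        (((PySem.Dict.counter headers).items.filter (fun p => 1 < p.2)).map (·.1))
      ↔ 2 ≤ headers.count s := by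
  rw [PySem.Dict.items_counter]
  simp only [PySem.Set.mem_ofList, List.mem_map, List.mem_filter]
  constructor
  · rintro ⟨⟨k, ck⟩, ⟨hk, hc⟩, rfl⟩
    obtain ⟨k', _, hkk⟩ := hk
    simp only [Prod.mk.injEq] at hkk
    obtain ⟨rfl, rfl⟩ := hkk
    simp only [decide_eq_true_eq] at hc
    exact_mod_cast hc
  · intro h
    exact ⟨(s, (headers.count s : Int)),
      ⟨⟨s, List.count_pos_iff.mp (by omega), rfl⟩, by simp; exact_mod_cast h⟩, rfl⟩

theorem pvHeaders_startswith {lines : List String} {s : String}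
    (h : s ∈ pvHeaders lines) : PySem.Str.startswith s "#" = true := by
  simp only [pvHeaders, List.mem_map, List.mem_filter] at h
  obtain ⟨l, ⟨_, hl⟩, rfl⟩ := h
  exact hl
theorem pvHeaders_cons (line : String) (lines : List String) :
    pvHeaders (line :: lines) =
      (if PySem.Str.startswith (PySem.Str.strip line) "#" then [PySem.Str.strip line] else [])
        ++ pvHeaders lines := by
  simp only [pvHeaders, List.filter_cons]
  split_ifs with h
  · simp
  · simp_all
theorem pvLoop_agree (dup : PySem.Set String) (rest : List String) :
    ∀ (hp acc : List String) (seenA seenB : PySem.Set String),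
    (∀ s, s ∈ dup ↔ 2 ≤ hp.count s + (pvHeaders rest).count s) →
    (∀ s ∈ hp, PySem.Str.startswith s "#" = true) →
    (∀ s, s ∈ seenA ↔ (s ∈ hp ∧ s ∈ dup)) →
    (∀ s, s ∈ seenB ↔ s ∈ hp) →
    (rest.foldl (pvStepA dup) (acc, seenA)).1 = (rest.foldl pvStepB (acc, seenB)).1 := by
  induction rest with
  | nil => intro _ _ _ _ _ _ _ _; simp only [List.foldl_nil]
  | cons line rest ih =>
    intro hp acc seenA seenB hdup hhp hA hB
    simp only [List.foldl_cons]
    by_cases hs : PySem.Str.startswith (PySem.Str.strip line) "#" = true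
    · have hs' : PySem.Chars.startswith (PySem.Chars.strip line.toList) ['#'] = true := by
        simpa only [PySem.Str.startswith_eq, PySem.Str.toList_strip] using hs
      have hhd : pvHeaders (line :: rest) = PySem.Str.strip line :: pvHeaders rest := by
        rw [pvHeaders_cons]; simp [hs']
      have hdup' : ∀ t, t ∈ dup ↔
          2 ≤ (hp ++ [PySem.Str.strip line]).count t + (pvHeaders rest).count t := by
        intro t
        rw [hdup t, hhd]
        simp only [List.count_append, List.count_cons, List.count_nil]
        split_ifs <;> omega
      have hhp' : ∀ t ∈ hp ++ [PySem.Str.strip line], PySem.Str.startswith t "#" = true := by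
        intro t ht
        rcases List.mem_append.mp ht with h | h
        · exact hhp t h
        · simp at h; subst h; exact hs
      by_cases hmem : PySem.Str.strip line ∈ hp
      · have hdups : PySem.Str.strip line ∈ dup := by
          rw [hdup, hhd]
          have h1 : 1 ≤ hp.count (PySem.Str.strip line) := List.count_pos_iff.mpr hmem
          simp only [List.count_cons_self]
          omega
        have hseenA : PySem.Str.strip line ∈ seenA := (hA _).mpr ⟨hmem, hdups⟩
        have hseenB : PySem.Str.strip line ∈ seenB := (hB _).mpr hmem
        have hsA : pvStepA dup (acc, seenA) line = (acc, seenA) := by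
          simp [pvStepA, PySem.Set.contains, List.contains_eq_mem, hdups, hseenA]
        have hsB : pvStepB (acc, seenB) line = (acc, seenB) := by
          simp [pvStepB, hs', PySem.Set.contains, List.contains_eq_mem, hseenB]
        rw [hsA, hsB]
        apply ih (hp ++ [PySem.Str.strip line]) acc seenA seenB hdup' hhp'
        · intro t
          rw [hA t]
          constructor
          · rintro ⟨h1, h2⟩; exact ⟨List.mem_append_left _ h1, h2⟩
          · rintro ⟨h1, h2⟩
            rcases List.mem_append.mp h1 with h | h
            · exact ⟨h, h2⟩
            · simp at h; subst h; exact ⟨hmem, h2⟩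
        · intro t
          rw [hB t]
          constructor
          · intro h; exact List.mem_append_left _ h
          · intro h
            rcases List.mem_append.mp h with h | h
            · exact h
            · simp at h; subst h; exact hmem
      · have hseenA : PySem.Str.strip line ∉ seenA := fun h => hmem ((hA _).mp h).1
        have hseenB : PySem.Str.strip line ∉ seenB := fun h => hmem ((hB _).mp h)
        have hsB : pvStepB (acc, seenB) line =
            (acc ++ [line], PySem.Set.add seenB (PySem.Str.strip line)) := by
          simp [pvStepB, hs', PySem.Set.contains, List.contains_eq_mem, hseenB]
        have hB' : ∀ t, t ∈ PySem.Set.add seenB (PySem.Str.strip line) ↔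
            t ∈ hp ++ [PySem.Str.strip line] := by
          intro t
          rw [PySem.Set.mem_add, hB t]
          simp [or_comm]
        by_cases hdups : PySem.Str.strip line ∈ dup
        · have hsA : pvStepA dup (acc, seenA) line =
              (acc ++ [line], PySem.Set.add seenA (PySem.Str.strip line)) := by
            simp [pvStepA, PySem.Set.contains, List.contains_eq_mem, hdups, hseenA]
          rw [hsA, hsB]
          apply ih (hp ++ [PySem.Str.strip line]) _ _ _ hdup' hhp' _ hB'
          intro t
          rw [PySem.Set.mem_add, hA t]
          constructor
          · rintro (⟨h1, h2⟩ | h)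
            · exact ⟨List.mem_append_left _ h1, h2⟩
            · subst h; exact ⟨List.mem_append_right _ (by simp), hdups⟩
          · rintro ⟨h1, h2⟩
            rcases List.mem_append.mp h1 with h | h
            · exact Or.inl ⟨h, h2⟩
            · simp at h; exact Or.inr h
        · have hsA : pvStepA dup (acc, seenA) line = (acc ++ [line], seenA) := by
            simp [pvStepA, PySem.Set.contains, List.contains_eq_mem, hdups]
          rw [hsA, hsB]
          apply ih (hp ++ [PySem.Str.strip line]) _ _ _ hdup' hhp' _ hB'
          intro t
          rw [hA t]
          constructor
          · rintro ⟨h1, h2⟩; exact ⟨List.mem_append_left _ h1, h2⟩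
          · rintro ⟨h1, h2⟩
            rcases List.mem_append.mp h1 with h | h
            · exact ⟨h, h2⟩
            · simp at h; subst h; exact absurd h2 hdups
    · have hs' : PySem.Chars.startswith (PySem.Chars.strip line.toList) ['#'] = false := by
        have h0 := hs; rw [Bool.not_eq_true] at h0
        simpa only [PySem.Str.startswith_eq, PySem.Str.toList_strip] using h0
      have hnot_hp : PySem.Str.strip line ∉ hp := fun h => hs (hhp _ h)
      have hhd : pvHeaders (line :: rest) = pvHeaders rest := by
        rw [pvHeaders_cons]; simp [hs']
      have hdups : PySem.Str.strip line ∉ dup := by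
        intro h
        have hc := (hdup _).mp h
        have h1 : hp.count (PySem.Str.strip line) = 0 := List.count_eq_zero.mpr hnot_hp
        have h2 : (pvHeaders (line :: rest)).count (PySem.Str.strip line) = 0 :=
          List.count_eq_zero.mpr (fun hm => hs (pvHeaders_startswith hm))
        omega
      have hsA : pvStepA dup (acc, seenA) line = (acc ++ [line], seenA) := by
        simp [pvStepA, PySem.Set.contains, List.contains_eq_mem, hdups]
      have hsB : pvStepB (acc, seenB) line = (acc ++ [line], seenB) := by
        simp [pvStepB, hs']
      rw [hsA, hsB]
      apply ih hp _ _ _ (fun t => by rw [hdup t, hhd]) hhp hA hB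

-- ===== VERDICT (by name: the statement is the Claim_ definition above) =====
theorem remove_duplicate_headers_spec : Claim_equal_remove_duplicate_headers := by
  intro markdown_text _
  unfold Spec_remove_duplicate_headers remove_duplicate_headers remove_duplicate_headers_alt
  refine congrArg (PySem.Str.join "\n") ?_
  apply pvLoop_agree _ _ []
  · intro s
    rw [pvDup_mem]
    simp
  · intro s h
    simp at h
  · intro s
    simp [PySem.Set.empty]
  · intro s
    simp [PySem.Set.empty]
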